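-- pv_equiv track=rewrite | github.com/vijayaditya/kaldi | egs/wsj/s5/steps/nnet3/nodes.py | GetSumDescriptor
-- ===== SOURCE A (Python) =====
-- def GetSumDescriptor(inputs):
--     sum_descriptors = inputs
--     while len(sum_descriptors) != 1:
--         cur_sum_descriptors = []
--         pair = []
--         while len(sum_descriptors) > 0:
--             value = sum_descriptors.pop()
--             if value.strip() != '':
--                 pair.append(value)
--             if len(pair) == 2:
--                 cur_sum_descriptors.append("Sum({0}, {1})".format(pair[0], pair[1]))
--                 pair = []
--         if pair:
--             cur_sum_descriptors.append(pair[0])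
--         sum_descriptors = cur_sum_descriptors
--     return sum_descriptors
-- ===== SOURCE B (Python) =====
-- def _render(t):
--     if isinstance(t, tuple):
--         return "Sum({0}, {1})".format(_render(t[0]), _render(t[1]))
--     return t
--
--
-- def GetSumDescriptor(inputs):
--     if len(inputs) == 1:
--         return inputs
--     nodes = [v for v in inputs if v.strip() != '']
--     while len(nodes) > 1:
--         rev = nodes[::-1]
--         nxt = [(rev[i], rev[i + 1]) for i in range(0, len(rev) - 1, 2)]
--         if len(rev) % 2:
--             nxt.append(rev[-1])
--         nodes = nxt
--     return [_render(t) for t in nodes]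
-- ===== Notes on version B (the rewrite author's own statement) =====
-- stated objective: faster
-- what changed: B filters blanks once, pairs lightweight tree nodes (tuples) level by level instead of re-concatenating descriptor strings at every level, and serializes the final tree to a string in one pass.
import Mathlib
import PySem

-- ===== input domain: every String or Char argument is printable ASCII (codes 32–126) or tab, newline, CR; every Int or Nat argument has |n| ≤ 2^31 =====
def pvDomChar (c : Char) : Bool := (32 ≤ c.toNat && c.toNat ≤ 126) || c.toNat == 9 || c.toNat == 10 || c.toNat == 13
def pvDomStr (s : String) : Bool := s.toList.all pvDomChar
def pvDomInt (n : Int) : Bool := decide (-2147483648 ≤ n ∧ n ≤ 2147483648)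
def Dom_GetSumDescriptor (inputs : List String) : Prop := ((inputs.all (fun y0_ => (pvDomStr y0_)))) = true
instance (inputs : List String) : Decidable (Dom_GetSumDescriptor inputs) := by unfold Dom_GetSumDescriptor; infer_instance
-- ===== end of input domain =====

-- B replaces A's per-level rebuilding of ever longer "Sum(...)" strings by pairing cheap tree
-- nodes and serializing the final tree once (objective: faster). Note: Python A pops all elements
-- off the caller's `inputs` list when len(inputs) != 1; the equivalence here is about the RETURN
-- value only (B does not mutate its argument).

-- ===== PORT A =====
-- inner `while len(sum_descriptors) > 0: value = sum_descriptors.pop(); …` as structural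
-- recursion over the reversed list (pop from the end = scan the reverse), same (cur, pair) state
def pvInnerA : List String → List String → List String → List String × List String
  | [], cur, pair => (cur, pair)
  | v :: rest, cur, pair =>
    let pair' := if PySem.Str.strip v != "" then pair ++ [v] else pair
    if pair'.length = 2 then
      pvInnerA rest (cur ++ ["Sum(" ++ pair'.headI ++ ", " ++ pair'.getLastI ++ ")"]) []
    else
      pvInnerA rest cur pair'

-- one iteration of the outer while-loop body: run the inner loop, then `if pair: cur.append(pair[0])`
def pvLevelA (sd : List String) : List String :=
  match pvInnerA sd.reverse [] [] with
  | (cur, []) => cur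
  | (cur, p :: _) => cur ++ [p]

-- outer `while len(sum_descriptors) != 1` with fuel (the Python loop never terminates when the
-- list has length ≠ 1 and no non-blank entry; Pre_ excludes those inputs, and inputs.length + 1
-- iterations are proved sufficient inside Pre_)
def pvOuterA : Nat → List String → List String
  | 0, sd => sd
  | f + 1, sd => if sd.length ≠ 1 then pvOuterA f (pvLevelA sd) else sd

def GetSumDescriptor (inputs : List String) : List String :=
  pvOuterA (inputs.length + 1) inputs

-- ===== PORT B =====
inductive PvTree where
  | leaf : String → PvTree
  | node : PvTree → PvTree → PvTree
deriving DecidableEq, Repr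

-- `[(rev[i], rev[i+1]) for i in range(0, len(rev)-1, 2)]` plus the odd leftover appended last
def pvPairs : List PvTree → List PvTree
  | a :: b :: t => .node a b :: pvPairs t
  | [a] => [a]
  | [] => []

theorem pvPairs_length (l : List PvTree) : (pvPairs l).length = (l.length + 1) / 2 := by
  induction l using pvPairs.induct <;> (simp [pvPairs, *]; try omega)

-- `while len(nodes) > 1: nodes = …` — terminates unconditionally, len strictly shrinks
def pvBuildB (ns : List PvTree) : List PvTree :=
  if 1 < ns.length then pvBuildB (pvPairs ns.reverse) else ns
termination_by ns.length
decreasing_by simp [pvPairs_length]; omega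

def pvRender : PvTree → String
  | .leaf s => s
  | .node l r => "Sum(" ++ pvRender l ++ ", " ++ pvRender r ++ ")"

def GetSumDescriptor_alt (inputs : List String) : List String :=
  if inputs.length = 1 then inputs
  else
    (pvBuildB ((inputs.filter (fun v => PySem.Str.strip v != "")).map .leaf)).map pvRender

-- ===== PRECONDITION & SPEC =====
-- Pre_ excludes exactly the inputs on which A loops forever (never returns): a list of length ≠ 1
-- whose entries are all whitespace-only (in particular the empty list).
def Pre_GetSumDescriptor (inputs : List String) : Prop :=
  inputs.length = 1 ∨ ∃ v ∈ inputs, PySem.Str.strip v ≠ ""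
instance (inputs : List String) : Decidable (Pre_GetSumDescriptor inputs) := by
  unfold Pre_GetSumDescriptor; infer_instance
def pvWitness_GetSumDescriptor : List String := ["a", "b", " ", "c"]

def Spec_GetSumDescriptor (inputs : List String) (out : List String) : Prop := out = GetSumDescriptor_alt inputs
instance (inputs : List String) (out : List String) : Decidable (Spec_GetSumDescriptor inputs out) := by unfold Spec_GetSumDescriptor; infer_instance

-- ===== CLAIM (what is proved, stated in full; the proofs are below) =====
def Claim_equal_GetSumDescriptor : Prop := ∀ (inputs : List String), Dom_GetSumDescriptor inputs → Pre_GetSumDescriptor inputs → Spec_GetSumDescriptor inputs (GetSumDescriptor inputs)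

-- ===== LEMMAS AND PROOFS =====

-- string-level pairing (what one pass of A's inner loop produces)
def pvPairsS : List String → List String
  | a :: b :: t => ("Sum(" ++ a ++ ", " ++ b ++ ")") :: pvPairsS t
  | [a] => [a]
  | [] => []

-- combine inner-loop result with the trailing `if pair: cur.append(pair[0])`
def pvComb : List String × List String → List String
  | (cur, []) => cur
  | (cur, p :: _) => cur ++ [p]

theorem pvInnerA_spec (vs : List String) :
    (∀ cur, pvComb (pvInnerA vs cur []) =
      cur ++ pvPairsS (vs.filter (fun v => PySem.Str.strip v != ""))) ∧
    (∀ cur a, pvComb (pvInnerA vs cur [a]) =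
      cur ++ pvPairsS (a :: vs.filter (fun v => PySem.Str.strip v != ""))) := by
  induction vs with
  | nil => exact ⟨fun cur => by simp [pvInnerA, pvPairsS, pvComb],
              fun cur a => by simp [pvInnerA, pvPairsS, pvComb]⟩
  | cons v rest ih =>
    obtain ⟨ih0, ih1⟩ := ih
    by_cases hv : PySem.Str.strip v = ""
    · exact ⟨fun cur => by simpa [pvInnerA, hv] using ih0 cur,
             fun cur a => by simpa [pvInnerA, hv] using ih1 cur a⟩
    · refine ⟨fun cur => ?_, fun cur a => ?_⟩
      · simpa [pvInnerA, hv] using ih1 cur v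
      · have h2 := ih0 (cur ++ ["Sum(" ++ a ++ ", " ++ v ++ ")"])
        simp [pvInnerA, hv, pvPairsS, List.getLastI, h2]

theorem pvLevelA_spec (sd : List String) :
    pvLevelA sd = pvPairsS ((sd.filter (fun v => PySem.Str.strip v != "")).reverse) := by
  have h := (pvInnerA_spec sd.reverse).1 []
  unfold pvLevelA
  rw [List.filter_reverse] at h
  simp only [List.nil_append] at h
  rw [← h]
  rcases pvInnerA sd.reverse [] [] with ⟨cur, pair⟩
  cases pair <;> simp [pvComb]

theorem pvPairsS_render (ts : List PvTree) :
    pvPairsS (ts.map pvRender) = (pvPairs ts).map pvRender := by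
  induction ts using pvPairs.induct <;> simp [pvPairs, pvPairsS, pvRender, *]

-- a non-blank invariant: every level's entries strip to something non-empty
def pvNB (t : PvTree) : Prop := PySem.Str.strip (pvRender t) ≠ ""

theorem pvStrip_cons_ne {c : Char} (t : List Char) (hc : PySem.Chars.isspace c = false) :
    PySem.Chars.strip (c :: t) ≠ [] := by
  simp only [PySem.Chars.strip, PySem.Chars.lstrip, PySem.Chars.rstrip, List.dropWhile_cons, hc]
  intro h
  have h2 : List.dropWhile PySem.Chars.isspace (c :: t).reverse = [] := by
    simpa using h
  rw [List.dropWhile_eq_nil_iff] at h2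
  have := h2 c (by simp)
  simp [hc] at this

theorem pvNB_node (l r : PvTree) : pvNB (.node l r) := by
  unfold pvNB
  intro h
  have h1 : (PySem.Str.strip (pvRender (.node l r))).toList = [] := by rw [h]; rfl
  rw [PySem.Str.toList_strip] at h1
  have h2 : (pvRender (.node l r)).toList = 'S' :: ("um(" ++ pvRender l ++ ", " ++ pvRender r ++ ")").toList := by
    show ("Sum(" ++ pvRender l ++ ", " ++ pvRender r ++ ")").toList = _
    simp [String.toList_append]
  rw [h2] at h1
  exact pvStrip_cons_ne _ (by decide) h1

theorem pvNB_pairs {l : List PvTree} (h : ∀ t ∈ l, pvNB t) : ∀ t ∈ pvPairs l, pvNB t := by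
  induction l using pvPairs.induct with
  | case1 a b t ih =>
    intro x hx
    simp only [pvPairs, List.mem_cons] at hx
    rcases hx with rfl | hx
    · exact pvNB_node a b
    · exact ih (fun t ht => h t (by simp [ht])) x hx
  | case2 a => simpa [pvPairs] using h
  | case3 => simp [pvPairs]

theorem pvBuildB_step (ns : List PvTree) (h : ns ≠ []) :
    pvBuildB ns = pvBuildB (pvPairs ns.reverse) := by
  by_cases h1 : 1 < ns.length
  · rw [pvBuildB]; simp [h1]
  · have hlen : ns.length = 1 := by
      have := List.length_pos_iff.mpr h
      omega
    rcases ns with _ | ⟨a, _ | ⟨b, t⟩⟩ <;> simp_all [pvPairs, pvBuildB]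

theorem pvOuterA_spec (fuel : Nat) (ts : List PvTree) (hne : ts ≠ [])
    (hnb : ∀ t ∈ ts, pvNB t) (hf : ts.length ≤ fuel) :
    pvOuterA fuel (ts.map pvRender) = (pvBuildB ts).map pvRender := by
  induction fuel generalizing ts with
  | zero =>
    have := List.length_pos_iff.mpr hne
    omega
  | succ f ih =>
    by_cases h1 : ts.length = 1
    · rw [pvOuterA]
      simp only [List.length_map, h1]
      rw [pvBuildB]
      simp [h1]
    · have hlen : 2 ≤ ts.length := by
        have := List.length_pos_iff.mpr hne
        omega
      rw [pvOuterA]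
      simp only [List.length_map, if_pos h1]
      have hlev : pvLevelA (ts.map pvRender) = (pvPairs ts.reverse).map pvRender := by
        rw [pvLevelA_spec]
        have hfilt : (ts.map pvRender).filter (fun v => PySem.Str.strip v != "") = ts.map pvRender := by
          rw [List.filter_eq_self]
          intro s hs
          rw [List.mem_map] at hs
          obtain ⟨t, ht, rfl⟩ := hs
          simpa using hnb t ht
        rw [hfilt, ← List.map_reverse, pvPairsS_render]
      rw [hlev]
      rw [ih (pvPairs ts.reverse) ?_ ?_ ?_, ← pvBuildB_step ts hne]
      · intro hnil
        have := pvPairs_length ts.reverse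
        rw [hnil] at this
        simp at this
        omega
      · exact pvNB_pairs (fun t ht => hnb t (by simpa using ht))
      · have := pvPairs_length ts.reverse
        simp at this
        omega

-- ===== VERDICT (by name: the statement is the Claim_ definition above) =====
theorem GetSumDescriptor_spec : Claim_equal_GetSumDescriptor := by
  intro inputs _ hpre
  unfold Spec_GetSumDescriptor GetSumDescriptor GetSumDescriptor_alt
  by_cases h1 : inputs.length = 1
  · simp [h1, pvOuterA]
  · simp only [if_neg h1]
    set vals := inputs.filter (fun v => PySem.Str.strip v != "") with hvals
    have hvne : vals ≠ [] := by
      rcases hpre with h | ⟨v, hv, hnb⟩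
      · exact absurd h h1
      · intro hnil
        have : v ∈ vals := by
          rw [hvals, List.mem_filter]
          exact ⟨hv, by simpa using hnb⟩
        simp [hnil] at this
    have hlen2 : 2 ≤ inputs.length := by
      have h0 : 0 < vals.length := List.length_pos_iff.mpr hvne
      have hle : vals.length ≤ inputs.length := List.length_filter_le _ _
      omega
    rw [pvOuterA]
    simp only [if_pos h1]
    have hlev : pvLevelA inputs = (pvPairs ((vals.map PvTree.leaf).reverse)).map pvRender := by
      rw [pvLevelA_spec, ← hvals]
      have : ((vals.map PvTree.leaf).reverse).map pvRender = vals.reverse := by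
        rw [← List.map_reverse, List.map_map]
        simp [Function.comp_def, pvRender]
      rw [← this, pvPairsS_render]
    rw [hlev]
    have hnbv : ∀ t ∈ (vals.map PvTree.leaf).reverse, pvNB t := by
      intro t ht
      simp only [List.mem_reverse, List.mem_map] at ht
      obtain ⟨v, hv, rfl⟩ := ht
      rw [hvals, List.mem_filter] at hv
      simpa [pvNB, pvRender] using hv.2
    rw [pvOuterA_spec inputs.length (pvPairs (vals.map PvTree.leaf).reverse) ?_ ?_ ?_]
    · rw [← pvBuildB_step]
      simpa using hvne
    · intro hnil
      have hp := pvPairs_length (vals.map PvTree.leaf).reverse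
      rw [hnil] at hp
      simp at hp
      have h0 : 0 < vals.length := List.length_pos_iff.mpr hvne
      omega
    · exact pvNB_pairs hnbv
    · have := pvPairs_length (vals.map PvTree.leaf).reverse
      have hle : vals.length ≤ inputs.length := List.length_filter_le _ _
      simp at this
      omega
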